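-- pv_equiv track=rewrite | github.com/RamananVr/Leetcodepython | arrays/2757_generate_circular_array_values.py | generateCircularArrayOptimized
-- ===== SOURCE A (Python) =====
-- from typing import List
--
-- def generateCircularArrayOptimized(n: int, start: int) -> List[int]:
--     """
--     Optimized version that builds the array in one pass.
--
--     Args:
--         n: Length of array and modulo base
--         start: Starting value
--
--     Returns:
--         Generated circular array
--
--     Time Complexity: O(n)
--     Space Complexity: O(n)
--     """
--     result = []
--     current = start % n
--
--     for i in range(n):
--         result.append(current)
--         if i < n - 1:  # Don't update after last iteration
--             current = (current + i + 1) % n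
--
--     return result
-- ===== SOURCE B (Python) =====
-- from typing import List
--
-- def generateCircularArrayOptimized(n: int, start: int) -> List[int]:
--     base = start % n  # standalone so n == 0 raises ZeroDivisionError exactly as in A
--     return [(base + i * (i + 1) // 2) % n for i in range(n)]
-- ===== Notes on version B (the rewrite author's own statement) =====
-- stated objective: simpler
-- what changed: Replaced the running accumulator with a last-iteration guard by a list comprehension using the triangular-number closed form (base + i*(i+1)//2) % n per index.
import Mathlib
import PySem

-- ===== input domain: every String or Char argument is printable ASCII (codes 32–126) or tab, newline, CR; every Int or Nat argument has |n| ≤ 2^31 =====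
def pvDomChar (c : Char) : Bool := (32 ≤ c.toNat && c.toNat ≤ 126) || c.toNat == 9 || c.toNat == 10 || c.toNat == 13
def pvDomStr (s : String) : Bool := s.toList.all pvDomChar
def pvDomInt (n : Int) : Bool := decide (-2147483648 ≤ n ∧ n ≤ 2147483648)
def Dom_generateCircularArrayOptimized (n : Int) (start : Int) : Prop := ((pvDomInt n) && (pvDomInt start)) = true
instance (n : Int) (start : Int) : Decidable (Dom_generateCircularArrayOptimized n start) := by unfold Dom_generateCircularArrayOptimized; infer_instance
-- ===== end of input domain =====

-- B replaces A's running accumulator and last-iteration guard by a list comprehension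
-- with the triangular-number closed form (base + i*(i+1)//2) % n; objective: simpler.


-- ===== PORT A =====
def generateCircularArrayOptimized (n : Int) (start : Int) : List Int :=
  let init : List Int × Int := ([], PySem.Int.mod start n)
  let st := (PySem.List.pyRange 0 n 1).foldl
    (fun (st : List Int × Int) i =>
      (st.1 ++ [st.2], if i < n - 1 then PySem.Int.mod (st.2 + i + 1) n else st.2))
    init
  st.1

-- ===== PORT B =====
def generateCircularArrayOptimized_alt (n : Int) (start : Int) : List Int :=
  let base := PySem.Int.mod start n
  (PySem.List.pyRange 0 n 1).map
    (fun i => PySem.Int.mod (base + PySem.Int.floordiv (i * (i + 1)) 2) n)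

-- ===== PRECONDITION & SPEC =====
-- Pre_ excludes exactly n = 0, where the Python A (and B) raise ZeroDivisionError on start % n.
def Pre_generateCircularArrayOptimized (n : Int) (start : Int) : Prop := n ≠ 0
instance (n : Int) (start : Int) : Decidable (Pre_generateCircularArrayOptimized n start) := by unfold Pre_generateCircularArrayOptimized; infer_instance
def pvWitness_generateCircularArrayOptimized : Int × Int := (5, 2)
def Spec_generateCircularArrayOptimized (n : Int) (start : Int) (out : List Int) : Prop := out = generateCircularArrayOptimized_alt n start
instance (n : Int) (start : Int) (out : List Int) : Decidable (Spec_generateCircularArrayOptimized n start out) := by unfold Spec_generateCircularArrayOptimized; infer_instance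

-- ===== CLAIM (what is proved, stated in full; the proofs are below) =====
def Claim_equal_generateCircularArrayOptimized : Prop := ∀ (n : Int) (start : Int), Dom_generateCircularArrayOptimized n start → Pre_generateCircularArrayOptimized n start → Spec_generateCircularArrayOptimized n start (generateCircularArrayOptimized n start)

-- ===== LEMMAS AND PROOFS =====

-- T(a+1) = T(a) + (a+1) for the triangular term a*(a+1)//2
lemma tri_step (a : Int) :
    PySem.Int.floordiv ((a + 1) * (a + 2)) 2 = PySem.Int.floordiv (a * (a + 1)) 2 + (a + 1) := by
  rw [PySem.Int.floordiv_eq_ediv_of_pos (by omega), PySem.Int.floordiv_eq_ediv_of_pos (by omega)]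
  have h : (a + 1) * (a + 2) = a * (a + 1) + (a + 1) * 2 := by ring
  rw [h, Int.add_mul_ediv_right _ _ (by omega)]

-- loop invariant for A's fold: current at index a is (start + T a) % n
lemma loopA_inv (n start : Int) (hn : 0 < n) :
    ∀ (c : Nat) (a : Int), a + c = n → 0 ≤ a → ∀ res : List Int,
    ((PySem.List.pyRange a n 1).foldl
      (fun (st : List Int × Int) i =>
        (st.1 ++ [st.2], if i < n - 1 then PySem.Int.mod (st.2 + i + 1) n else st.2))
      (res, PySem.Int.mod (start + PySem.Int.floordiv (a * (a + 1)) 2) n)).1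
    = res ++ (PySem.List.pyRange a n 1).map
        (fun i => PySem.Int.mod (PySem.Int.mod start n + PySem.Int.floordiv (i * (i + 1)) 2) n) := by
  intro c
  induction c with
  | zero =>
    intro a ha h0 res
    rw [PySem.List.pyRange_one_eq_nil (by omega)]
    simp
  | succ k ih =>
    intro a ha h0 res
    rw [PySem.List.pyRange_one_cons (by omega)]
    simp only [List.foldl_cons, List.map_cons]
    have hemodfold : ∀ x y : Int, PySem.Int.mod (PySem.Int.mod x n + y) n = PySem.Int.mod (x + y) n := by
      intro x y
      rw [PySem.Int.mod_eq_emod_of_pos hn, PySem.Int.mod_eq_emod_of_pos hn,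
          PySem.Int.mod_eq_emod_of_pos hn, Int.emod_add_emod]
    have hcur : PySem.Int.mod (start + PySem.Int.floordiv (a * (a + 1)) 2) n
        = PySem.Int.mod (PySem.Int.mod start n + PySem.Int.floordiv (a * (a + 1)) 2) n := by
      rw [hemodfold]
    by_cases hlt : a < n - 1
    · have hnext : (if a < n - 1 then
          PySem.Int.mod ((PySem.Int.mod (start + PySem.Int.floordiv (a * (a + 1)) 2) n) + a + 1) n
        else PySem.Int.mod (start + PySem.Int.floordiv (a * (a + 1)) 2) n)
        = PySem.Int.mod (start + PySem.Int.floordiv ((a + 1) * (a + 1 + 1)) 2) n := by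
        rw [if_pos hlt]
        have : (PySem.Int.mod (start + PySem.Int.floordiv (a * (a + 1)) 2) n) + a + 1
            = PySem.Int.mod (start + PySem.Int.floordiv (a * (a + 1)) 2) n + (a + 1) := by ring
        rw [this, hemodfold]
        have h2 : a + 1 + 1 = a + 2 := by ring
        rw [h2, tri_step]
        ring_nf
      have := ih (a + 1) (by omega) (by omega) (res ++ [PySem.Int.mod (start + PySem.Int.floordiv (a * (a + 1)) 2) n])
      simp only [hnext]
      rw [this, hcur]
      simp
    · -- last iteration: a = n - 1, remaining range is empty
      have hk : k = 0 := by omega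
      subst hk
      rw [if_neg hlt]
      rw [PySem.List.pyRange_one_eq_nil (by omega)]
      simp only [List.foldl_nil, List.map_nil]
      rw [hcur]

-- ===== VERDICT (by name: the statement is the Claim_ definition above) =====
theorem generateCircularArrayOptimized_spec : Claim_equal_generateCircularArrayOptimized := by
  intro n start _ hpre
  unfold Spec_generateCircularArrayOptimized generateCircularArrayOptimized generateCircularArrayOptimized_alt
  by_cases hn : 0 < n
  · have key := loopA_inv n start hn n.toNat 0 (by omega) (by omega) []
    simp only [show PySem.Int.floordiv (0 * (0 + 1)) 2 = 0 from by decide, add_zero] at key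
    simpa using key
  · have : n < 0 := by
      rcases lt_trichotomy n 0 with h | h | h
      · exact h
      · exact absurd h hpre
      · exact absurd h hn
    rw [PySem.List.pyRange_one_eq_nil (by omega)]
    simp
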